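-- pv_equiv track=rewrite | github.com/kwoneyng/beakjoon | 튜플.py | solution
-- ===== SOURCE A (Python) =====
-- def solution(s):
--     s=s[1:-1]
--     arr = []
--     string = ''
--     item = []
--     for i in s:
--         if i == '{':
--             pass
--         elif i == '}':
--             item.append(int(string))
--             arr.append(item)
--             string = ''
--             item = []
--         elif i == ',':
--             if not item and not string:
--                 continue
--             item.append(int(string))
--             string = ''
--         else:
--             string += i
--     arr.sort(key=lambda x:len(x))
--     return arr
-- ===== SOURCE B (Python) =====
-- def solution(s):
--     # Tokenize instead of running a per-character state machine:
--     # drop outer chars, erase '{', split into groups on '}' (trailing leftover discarded),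
--     # strip the skipped leading commas of each group and split it on ','.
--     groups = s[1:-1].replace('{', '').split('}')[:-1]
--     arr = [[int(t) for t in g.lstrip(',').split(',')] for g in groups]
--     arr.sort(key=len)
--     return arr
-- ===== Notes on version B (the rewrite author's own statement) =====
-- stated objective: idiomatic
-- what changed: A's per-character state machine (accumulating string/item/arr with skip logic) is replaced by split-based tokenization: erase '{', split the inner text on '}' into groups, lstrip each group's leading commas and split it on ',' into int tokens.
import Mathlib
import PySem

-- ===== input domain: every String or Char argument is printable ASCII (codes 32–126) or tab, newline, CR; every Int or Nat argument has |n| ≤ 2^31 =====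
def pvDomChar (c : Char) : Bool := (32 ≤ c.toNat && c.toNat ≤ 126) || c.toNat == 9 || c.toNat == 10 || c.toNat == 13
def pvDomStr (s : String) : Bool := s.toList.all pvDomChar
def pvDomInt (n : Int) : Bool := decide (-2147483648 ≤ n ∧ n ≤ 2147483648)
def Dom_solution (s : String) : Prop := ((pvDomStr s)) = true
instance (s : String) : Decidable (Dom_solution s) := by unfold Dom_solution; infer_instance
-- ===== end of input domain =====

-- B replaces A's per-character state machine by split-based tokenization (erase '{',
-- split on '}', lstrip ',' and split each group on ','); objective: simpler/idiomatic.

-- ===== PORT A =====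
-- int(string): total form (Python raises on none; those inputs are excluded by Pre_solution)
def pvIntOf (cs : List Char) : Int := (PySem.Int.ofChars? cs).getD 0

-- one iteration of A's for-loop; state = (arr, string as List Char, item)
def pvStepA (st : List (List Int) × List Char × List Int) (c : Char) :
    List (List Int) × List Char × List Int :=
  let (arr, str, item) := st
  if c = '{' then st
  else if c = '}' then (arr ++ [item ++ [pvIntOf str]], [], [])
  else if c = ',' then
    (if item = [] ∧ str = [] then st else (arr, [], item ++ [pvIntOf str]))
  else (arr, str ++ [c], item)

def solution (s : String) : List (List Int) :=
  let inner := PySem.List.slice s.toList (some 1) (some (-1))   -- s[1:-1]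
  let fin := inner.foldl pvStepA ([], [], [])
  PySem.List.sorted fin.1 (fun x => PySem.List.len x) false     -- arr.sort(key=len)

-- ===== PORT B =====
def solution_alt (s : String) : List (List Int) :=
  let inner := PySem.List.slice s.toList (some 1) (some (-1))   -- s[1:-1]
  -- .replace('{','').split('}')[:-1]  ( xs[:-1] = dropLast, cf. slice_to_neg_one )
  let groups := (PySem.Chars.splitOn (PySem.Chars.replace inner ['{'] []) ['}']).dropLast
  -- g.lstrip(',') for a one-char strip set is dropWhile (exact: removes leading ',')
  let arr := groups.map (fun g =>
    (PySem.Chars.splitOn (g.dropWhile (· = ',')) [',']).map pvIntOf)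
  PySem.List.sorted arr (fun x => PySem.List.len x) false       -- arr.sort(key=len)

-- ===== PRECONDITION & SPEC =====
-- Pre_ excludes exactly the inputs where A raises ValueError: some substring that A
-- hands to int() is not an int literal.  A calls int() on every ','-piece of every
-- '}'-terminated group (after the skipped leading commas) and on every piece but the
-- last of the trailing leftover text.
def Pre_solution (s : String) : Prop :=
  let inner := (PySem.List.slice s.toList (some 1) (some (-1))).filter (fun c => !(c == '{'))
  let segs := PySem.Chars.splitOn inner ['}']
  let pieces := fun (g : List Char) => PySem.Chars.splitOn (g.dropWhile (· = ',')) [',']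
  (∀ g ∈ segs.dropLast, ∀ tok ∈ pieces g, (PySem.Int.ofChars? tok).isSome = true) ∧
  (∀ tok ∈ (pieces (segs.getLastD [])).dropLast, (PySem.Int.ofChars? tok).isSome = true)
instance (s : String) : Decidable (Pre_solution s) := by unfold Pre_solution; infer_instance

def pvWitness_solution : String := "{{1,2},{3}}"

def Spec_solution (s : String) (out : List (List Int)) : Prop := out = solution_alt s
instance (s : String) (out : List (List Int)) : Decidable (Spec_solution s out) := by unfold Spec_solution; infer_instance

-- ===== CLAIM (what is proved, stated in full; the proofs are below) =====
def Claim_equal_solution : Prop := ∀ (s : String), Dom_solution s → Pre_solution s → Spec_solution s (solution s)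

-- ===== LEMMAS AND PROOFS =====

-- reference single-char splitter both library splits reduce to
def pvSplitC (sep : Char) : List Char → List (List Char)
  | [] => [[]]
  | c :: t =>
    if c = sep then [] :: pvSplitC sep t
    else
      match pvSplitC sep t with
      | [] => [[c]]
      | g :: gs => (c :: g) :: gs

theorem pvSplitC_ne_nil (sep : Char) (l : List Char) : pvSplitC sep l ≠ [] := by
  cases l with
  | nil => simp [pvSplitC]
  | cons c t =>
    simp only [pvSplitC]
    split
    · simp
    · split <;> simp_all

theorem pvSplitC_of_not_mem (sep : Char) (l : List Char) (h : sep ∉ l) :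
    pvSplitC sep l = [l] := by
  induction l with
  | nil => rfl
  | cons c t ih =>
    simp only [List.mem_cons, not_or] at h
    simp [pvSplitC, Ne.symm h.1, ih h.2]

theorem pvSplitC_append (sep : Char) (g rest : List Char) (h : sep ∉ g) :
    pvSplitC sep (g ++ sep :: rest) = g :: pvSplitC sep rest := by
  induction g with
  | nil => simp [pvSplitC]
  | cons c t ih =>
    simp only [List.mem_cons, not_or] at h
    simp only [List.cons_append, pvSplitC, if_neg (Ne.symm h.1), ih h.2]

theorem pvSplitOn_go (sep : Char) (l : List Char) :
    ∀ (fuel : Nat) (cur : List Char) (acc : List (List Char)), l.length ≤ fuel →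
    PySem.Chars.splitOn.go [sep] fuel l cur acc =
      acc.reverse ++ ((pvSplitC sep l).modifyHead (cur.reverse ++ ·)) := by
  induction l with
  | nil =>
    intro fuel cur acc _
    cases fuel <;> simp [PySem.Chars.splitOn.go, pvSplitC]
  | cons c t ih =>
    intro fuel cur acc hf
    cases fuel with
    | zero => simp at hf
    | succ f =>
      simp only [List.length_cons] at hf
      by_cases hc : c = sep
      · subst hc
        have hpre : [c].isPrefixOf (c :: t) = true := by simp [List.isPrefixOf]
        simp only [PySem.Chars.splitOn.go, hpre, if_pos, List.length_cons, List.length_nil,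
          List.drop_succ_cons, List.drop_zero]
        rw [ih f [] (cur.reverse :: acc) (by omega)]
        cases hsp : pvSplitC c t with
        | nil => exact absurd hsp (pvSplitC_ne_nil c t)
        | cons g gs => simp [pvSplitC, hsp]
      · have hpre : [sep].isPrefixOf (c :: t) = false := by
          simp [List.isPrefixOf, Ne.symm hc]
        simp only [PySem.Chars.splitOn.go, hpre, Bool.false_eq_true, if_false]
        rw [ih f (c :: cur) acc (by omega)]
        simp only [pvSplitC, if_neg hc]
        cases hsp : pvSplitC sep t with
        | nil => exact absurd hsp (pvSplitC_ne_nil sep t)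
        | cons g gs => simp

theorem pvSplitOn_eq (sep : Char) (l : List Char) :
    PySem.Chars.splitOn l [sep] = pvSplitC sep l := by
  unfold PySem.Chars.splitOn
  rw [pvSplitOn_go sep l (l.length + 1) [] [] (by omega)]
  cases h : pvSplitC sep l with
  | nil => exact absurd h (pvSplitC_ne_nil sep l)
  | cons g gs => simp

theorem pvReplace_go (c : Char) (l : List Char) :
    ∀ (fuel : Nat) (acc : List Char), l.length ≤ fuel →
    PySem.Chars.replace.go [c] [] fuel l acc =
      acc.reverse ++ l.filter (fun d => !(d == c)) := by
  induction l with
  | nil =>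
    intro fuel acc _
    cases fuel <;> simp [PySem.Chars.replace.go]
  | cons d t ih =>
    intro fuel acc hf
    cases fuel with
    | zero => simp at hf
    | succ f =>
      simp only [List.length_cons] at hf
      by_cases hd : d = c
      · subst hd
        have hpre : [d].isPrefixOf (d :: t) = true := by simp [List.isPrefixOf]
        simp only [PySem.Chars.replace.go, hpre, if_pos, List.length_cons, List.length_nil,
          List.drop_succ_cons, List.drop_zero, List.reverse_nil, List.nil_append]
        rw [ih f acc (by omega)]
        simp
      · have hpre : [c].isPrefixOf (d :: t) = false := by
          simp [List.isPrefixOf, Ne.symm hd]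
        simp only [PySem.Chars.replace.go, hpre, Bool.false_eq_true, if_false]
        rw [ih f (d :: acc) (by omega)]
        simp [hd]

theorem pvReplace_eq (l : List Char) :
    PySem.Chars.replace l ['{'] [] = l.filter (fun d => !(d == '{')) := by
  unfold PySem.Chars.replace
  simp only [List.isEmpty_cons, Bool.false_eq_true, if_false]
  exact pvReplace_go '{' l l.length [] le_rfl

-- A's loop ignores '{'
theorem pvFoldA_filter (l : List Char) (st : List (List Int) × List Char × List Int) :
    l.foldl pvStepA st = (l.filter (fun d => !(d == '{'))).foldl pvStepA st := by
  induction l generalizing st with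
  | nil => rfl
  | cons c t ih =>
    by_cases hc : c = '{'
    · subst hc; simpa [pvStepA] using ih st
    · rw [List.filter_cons_of_pos (by simp [hc])]
      simp only [List.foldl_cons]
      exact ih (pvStepA st c)

-- without '}' the loop never touches arr
theorem pvFoldA_arr_const (l : List Char) (h : '}' ∉ l) :
    ∀ arr str item, ((l.foldl pvStepA (arr, str, item)).1 = arr) := by
  induction l with
  | nil => intro arr str item; rfl
  | cons c t ih =>
    simp only [List.mem_cons, not_or] at h
    intro arr str item
    simp only [List.foldl_cons, pvStepA]
    by_cases h1 : c = '{'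
    · simp only [h1, if_true]; exact ih h.2 arr str item
    · simp only [if_neg h1, if_neg (Ne.symm h.1)]
      by_cases h2 : c = ','
      · simp only [h2, if_true]
        by_cases h3 : item = [] ∧ str = []
        · simp only [if_pos h3]; exact ih h.2 arr str item
        · simp only [if_neg h3]; exact ih h.2 arr [] (item ++ [pvIntOf str])
      · simp only [if_neg h2]; exact ih h.2 arr (str ++ [c]) item

-- the tokens of one group, as B computes them
def pvProcSeg (g : List Char) : List Int := (pvSplitC ',' (g.dropWhile (· = ','))).map pvIntOf

-- the loop across one '}'-terminated group, once a token or an item exists (no skipping)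
theorem pvFoldA_noskip (t : List Char) (hbr : '}' ∉ t) (hob : '{' ∉ t) :
    ∀ arr str item, ',' ∉ str → (str ≠ [] ∨ item ≠ []) →
    (t ++ ['}']).foldl pvStepA (arr, str, item) =
      (arr ++ [item ++ (pvSplitC ',' (str ++ t)).map pvIntOf], [], []) := by
  induction t with
  | nil =>
    intro arr str item hcs _
    simp [pvStepA, pvSplitC_of_not_mem ',' str hcs]
  | cons c t ih =>
    simp only [List.mem_cons, not_or] at hbr hob
    intro arr str item hcs hne
    simp only [List.cons_append, List.foldl_cons, pvStepA]
    by_cases h2 : c = ','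
    · subst h2
      have hcond : ¬ (item = [] ∧ str = []) := by
        rcases hne with h | h
        · exact fun hx => h hx.2
        · exact fun hx => h hx.1
      rw [if_neg (by decide : ¬ (',' : Char) = '{'), if_neg (by decide : ¬ (',' : Char) = '}'),
        if_pos rfl, if_neg hcond,
        ih hbr.2 hob.2 arr [] (item ++ [pvIntOf str]) (by simp) (Or.inr (by simp))]
      rw [pvSplitC_append ',' str t hcs]
      simp
    · rw [if_neg (Ne.symm hob.1), if_neg (Ne.symm hbr.1), if_neg h2,
        ih hbr.2 hob.2 arr (str ++ [c]) item (by simp [hcs, Ne.symm h2]) (Or.inl (by simp))]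
      simp

-- the loop across one '}'-terminated group from the reset state
theorem pvFoldA_seg (g : List Char) (hbr : '}' ∉ g) (hob : '{' ∉ g) :
    ∀ arr, (g ++ ['}']).foldl pvStepA (arr, [], []) = (arr ++ [pvProcSeg g], [], []) := by
  induction g with
  | nil =>
    intro arr
    simp [pvStepA, pvProcSeg, pvSplitC, pvIntOf]
  | cons c t ih =>
    simp only [List.mem_cons, not_or] at hbr hob
    intro arr
    by_cases h2 : c = ','
    · subst h2
      have hskip : List.foldl pvStepA (arr, [], []) ((',' :: t) ++ ['}']) =
          List.foldl pvStepA (arr, [], []) (t ++ ['}']) := rfl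
      rw [hskip, ih hbr.2 hob.2 arr]
      simp [pvProcSeg]
    · simp only [List.cons_append, List.foldl_cons, pvStepA, List.nil_append]
      rw [if_neg (Ne.symm hob.1), if_neg (Ne.symm hbr.1), if_neg h2,
        pvFoldA_noskip t hbr.2 hob.2 arr [c] [] (by simp [Ne.symm h2]) (Or.inl (by simp))]
      simp only [pvProcSeg, List.dropWhile_cons, decide_eq_true_eq, if_neg h2]
      simp

-- first-occurrence decomposition
theorem pvSplitAt_mem (l : List Char) (h : '}' ∈ l) :
    ∃ g rest, l = g ++ '}' :: rest ∧ '}' ∉ g := by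
  induction l with
  | nil => simp at h
  | cons c t ih =>
    by_cases hc : c = '}'
    · exact ⟨[], t, by simp [hc], by simp⟩
    · rcases ih (by simpa [Ne.symm hc] using h) with ⟨g, rest, hgl, hg⟩
      exact ⟨c :: g, rest, by simp [hgl], by simp [hg, Ne.symm hc]⟩

-- main loop characterisation: arr after the whole loop = B's group list
theorem pvFoldA_main (n : Nat) : ∀ (l : List Char), l.length ≤ n → '{' ∉ l → ∀ arr,
    (l.foldl pvStepA (arr, [], [])).1 = arr ++ ((pvSplitC '}' l).dropLast).map pvProcSeg := by
  induction n with
  | zero =>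
    intro l hl _ arr
    have : l = [] := List.eq_nil_of_length_eq_zero (by omega)
    subst this; simp [pvSplitC]
  | succ n ih =>
    intro l hl hob arr
    by_cases hbr : '}' ∈ l
    · rcases pvSplitAt_mem l hbr with ⟨g, rest, hgl, hg⟩
      subst hgl
      have hobg : '{' ∉ g := fun hx => hob (by simp [hx])
      have hobr : '{' ∉ rest := fun hx => hob (by simp [hx])
      have : g ++ '}' :: rest = (g ++ ['}']) ++ rest := by simp
      rw [this, List.foldl_append, pvFoldA_seg g hg hobg arr]
      rw [ih rest (by simp at hl; omega) hobr (arr ++ [pvProcSeg g])]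
      rw [show g ++ ['}'] ++ rest = g ++ '}' :: rest by simp]
      rw [pvSplitC_append '}' g rest hg]
      cases hsp : pvSplitC '}' rest with
      | nil => exact absurd hsp (pvSplitC_ne_nil '}' rest)
      | cons x xs => simp
    · rw [pvSplitC_of_not_mem '}' l hbr]
      simp [pvFoldA_arr_const l hbr arr [] []]

theorem pv_ports_eq (s : String) : solution s = solution_alt s := by
  unfold solution solution_alt
  dsimp only
  rw [pvReplace_eq, pvSplitOn_eq]
  rw [pvFoldA_filter]
  rw [pvFoldA_main (PySem.List.slice s.toList (some 1) (some (-1))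
        |>.filter (fun d => !(d == '{'))).length _ le_rfl (by simp) []]
  simp only [List.nil_append]
  congr 1
  apply List.map_congr_left
  intro g _
  simp [pvProcSeg, pvSplitOn_eq]

-- ===== VERDICT (by name: the statement is the Claim_ definition above) =====
theorem solution_spec : Claim_equal_solution := by
  intro s _ _
  unfold Spec_solution
  exact pv_ports_eq s
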